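-- pv_equiv track=rewrite | github.com/Aljuagme/werewolves | werewolves/WWManagementSystem.py | make_suggestions
-- ===== SOURCE A (Python) =====
-- def make_suggestions(n):
--     suggestions = {"werewolves": 1, "whitewerewolf": 1, "seer": 0, "hunter": 1, "witch": 1, "amor": 0}
--     for i in range(7, n + 1, 1):
--         if i % 2 == 0:
--             suggestions["werewolves"] += 1
--         if i == 8:
--             suggestions["seer"] += 1
--         elif i == 10:
--             suggestions["amor"] += 1
--     return suggestions
-- ===== SOURCE B (Python) =====
-- def make_suggestions(n):
--     return {
--         "werewolves": 1 + (n // 2 - 3 if n >= 8 else 0),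
--         "whitewerewolf": 1,
--         "seer": 1 if n >= 8 else 0,
--         "hunter": 1,
--         "witch": 1,
--         "amor": 1 if n >= 10 else 0,
--     }
-- ===== Notes on version B (the rewrite author's own statement) =====
-- stated objective: faster
-- what changed: Replaced the counting loop over range(7, n+1) with a closed-form dict computed directly from n: werewolves from floor division of n, seer and amor from threshold checks on n.
import Mathlib
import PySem

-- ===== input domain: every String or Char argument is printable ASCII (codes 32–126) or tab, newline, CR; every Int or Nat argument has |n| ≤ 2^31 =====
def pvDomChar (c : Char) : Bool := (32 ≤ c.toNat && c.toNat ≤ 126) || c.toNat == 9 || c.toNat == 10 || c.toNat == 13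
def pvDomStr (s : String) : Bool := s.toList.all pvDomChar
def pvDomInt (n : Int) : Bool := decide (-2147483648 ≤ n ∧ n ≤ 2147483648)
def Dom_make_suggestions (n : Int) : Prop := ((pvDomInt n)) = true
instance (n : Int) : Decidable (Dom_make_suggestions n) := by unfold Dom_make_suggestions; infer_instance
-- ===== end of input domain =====

-- B replaces A's O(n) counting loop over range(7, n+1) with a closed-form dict (objective: faster, asymptotic).

-- ===== PORT A =====
def pvInit : PySem.Dict String Int :=
  PySem.Dict.ofList [("werewolves", 1), ("whitewerewolf", 1), ("seer", 0),
                     ("hunter", 1), ("witch", 1), ("amor", 0)]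

def pvStep (d : PySem.Dict String Int) (i : Int) : PySem.Dict String Int :=
  let d := if PySem.Int.mod i 2 == 0 then d.modify "werewolves" 0 (· + 1) else d
  if i == 8 then d.modify "seer" 0 (· + 1)
  else if i == 10 then d.modify "amor" 0 (· + 1)
  else d

def make_suggestions (n : Int) : List (String × Int) :=
  ((PySem.List.pyRange 7 (n + 1) 1).foldl pvStep pvInit).items

-- ===== PORT B =====
def make_suggestions_alt (n : Int) : List (String × Int) :=
  [("werewolves", 1 + (if 8 ≤ n then PySem.Int.floordiv n 2 - 3 else 0)),
   ("whitewerewolf", 1),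
   ("seer", if 8 ≤ n then 1 else 0),
   ("hunter", 1),
   ("witch", 1),
   ("amor", if 10 ≤ n then 1 else 0)]

-- ===== PRECONDITION & SPEC =====
def Spec_make_suggestions (n : Int) (out : List (String × Int)) : Prop := out = make_suggestions_alt n
instance (n : Int) (out : List (String × Int)) : Decidable (Spec_make_suggestions n out) := by unfold Spec_make_suggestions; infer_instance

-- ===== CLAIM (what is proved, stated in full; the proofs are below) =====
def Claim_equal_make_suggestions : Prop := ∀ (n : Int), Dom_make_suggestions n → Spec_make_suggestions n (make_suggestions n)

-- ===== LEMMAS AND PROOFS =====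

-- the dict after folding the loop body over range(7, 7+k): counts in closed form over k
def pvShape (w s a : Int) : PySem.Dict String Int :=
  PySem.Dict.ofList [("werewolves", w), ("whitewerewolf", 1), ("seer", s),
                     ("hunter", 1), ("witch", 1), ("amor", a)]

lemma pvShape_congr {w w' s s' a a' : Int} (hw : w = w') (hs : s = s') (ha : a = a') :
    pvShape w s a = pvShape w' s' a' := by rw [hw, hs, ha]

lemma pvShape_items (w s a : Int) :
    (pvShape w s a).items = [("werewolves", w), ("whitewerewolf", 1), ("seer", s),
                            ("hunter", 1), ("witch", 1), ("amor", a)] := rfl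

lemma pvStep_shape (w s a i : Int) :
    pvStep (pvShape w s a) i =
      pvShape (w + if PySem.Int.mod i 2 == 0 then 1 else 0)
              (s + if i == 8 then 1 else 0)
              (a + if i == 10 then 1 else 0) := by
  unfold pvStep
  by_cases h2 : PySem.Int.mod i 2 == 0 <;>
  by_cases h8 : i == 8 <;>
  by_cases h10 : i == 10 <;>
  simp_all <;>
  first
  | omega
  | rfl

lemma pvMod_step (k : Nat) :
    (PySem.Int.mod (7 + (k : Int)) 2 == 0) = decide ((k : Int) % 2 = 1) := by
  have hf : Int.fmod (7 + (k : Int)) 2 = (7 + (k : Int)) % 2 := by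
    rw [Int.fmod_eq_emod]; norm_num
  simp only [PySem.Int.mod, hf]
  by_cases h : (k : Int) % 2 = 1 <;> simp [h] <;> omega

lemma pvLoop_inv (k : Nat) :
    (PySem.List.pyRange 7 (7 + (k : Int)) 1).foldl pvStep pvInit =
      pvShape (1 + (k / 2 : Nat)) (if 2 ≤ k then 1 else 0) (if 4 ≤ k then 1 else 0) := by
  induction k with
  | zero =>
      rw [PySem.List.pyRange_one_eq_nil (by omega)]
      rfl
  | succ k ih =>
      have h : (7 : Int) + ((k + 1 : Nat) : Int) = (7 + (k : Int)) + 1 := by push_cast; ring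
      rw [h, PySem.List.pyRange_one_succ_right (by omega), List.foldl_append]
      rw [ih]
      simp only [List.foldl, pvStep_shape]
      have h8 : ((7 + (k : Int)) == 8) = decide (k = 1) := by
        by_cases h : k = 1 <;> first | (simp [h]; omega) | simp [h]
      have h10 : ((7 + (k : Int)) == 10) = decide (k = 3) := by
        by_cases h : k = 3 <;> first | (simp [h]; omega) | simp [h]
      rw [pvMod_step, h8, h10]
      simp only [decide_eq_true_eq]
      apply pvShape_congr <;> split_ifs <;> push_cast <;> omega

lemma pvAlt_shape (n : Int) (hn : 6 ≤ n) :
    make_suggestions_alt n =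
      (pvShape (1 + ((n - 6).toNat / 2 : Nat)) (if 2 ≤ (n - 6).toNat then 1 else 0)
               (if 4 ≤ (n - 6).toNat then 1 else 0)).items := by
  rw [pvShape_items]
  unfold make_suggestions_alt
  have e1 : 1 + (if 8 ≤ n then PySem.Int.floordiv n 2 - 3 else 0)
      = 1 + (((n - 6).toNat / 2 : Nat) : Int) := by
    simp only [PySem.Int.floordiv]
    have hf : Int.fdiv n 2 = n / 2 := by rw [Int.fdiv_eq_ediv]; norm_num
    rw [hf]
    split_ifs with h <;> omega
  have e2 : (if (8:Int) ≤ n then (1:Int) else 0) = (if 2 ≤ (n - 6).toNat then 1 else 0) := by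
    split_ifs <;> omega
  have e3 : (if (10:Int) ≤ n then (1:Int) else 0) = (if 4 ≤ (n - 6).toNat then 1 else 0) := by
    split_ifs <;> omega
  rw [e1, e2, e3]

-- ===== VERDICT (by name: the statement is the Claim_ definition above) =====
theorem make_suggestions_spec : Claim_equal_make_suggestions := by
  intro n _
  unfold Spec_make_suggestions make_suggestions
  by_cases hn : 6 <= n
  · have hk : n + 1 = 7 + ((n - 6).toNat : Int) := by omega
    rw [hk, pvLoop_inv, pvAlt_shape n hn]
  · rw [PySem.List.pyRange_one_eq_nil (by omega)]
    have h8 : ¬ ((8:Int) ≤ n) := by omega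
    have h10 : ¬ ((10:Int) ≤ n) := by omega
    simp [make_suggestions_alt, h8, h10]
    rfl
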